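/- GENERATED by tools/from_farm_form.py from prooffarm-gif/accepted/digest_file.5/Proof.lean (a worked proof of the farm's unit `digest_file.5`,
   accepted by the verdict) — do not edit. -/
import Gif.Spec.Units.digest_file_5
import Gif.Spec.AllSegs
import Gif.Spec.Proved.digest_file_5_Lemmas

namespace Gif.Spec.digest_file_5
end Gif.Spec.digest_file_5

/-- Segment 5 of `digest_file` (10591AH … 10594BH; gif_driver.c:164-166): inside one round of the image loop,
`digest_int(h, Width)`, `digest_int(h, Height)`, the checked byte load of `sp->ImageDesc.Interlace` with its `digest_int`.
One lemma per returned callee state (work/Lemmas.lean): `Round` is re-established at each call's return by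
`seg5_round_carry` (the calls wrote only `[RA − 224, RA − 88)`: below the locals), and the three pieces are chained here. -/
theorem Gif.Spec.Proved.digest_file_5_ok : Gif.Spec.digest_file_5.Statement := by
  intro Lay hLay μ hμ u₀ hcode h_int h_load1 H rest frames F R e ret m v hr
  -- 0x10591a … 0x105925: digest_int(h, Width)
  refine (Gif.Spec.digest_file_5.seg5_call1 hLay hμ hcode h_int hr).trans ?_
  intro v1 hr1
  -- 0x105925 … 0x105930: digest_int(h, Height)
  refine (Gif.Spec.digest_file_5.seg5_call2 hLay hμ hcode h_int hr1).trans ?_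
  intro v2 hr2
  -- 0x105930 … 0x10594b: the checked load of Interlace, digest_int(h, Interlace)
  exact Gif.Spec.digest_file_5.seg5_call3 hLay hμ hcode h_int h_load1 hr2
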